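-- pv_equiv track=rewrite | github.com/Omkar270048/OMR-Reader | omr_processing.py | divide_contour_into_columns
-- ===== SOURCE A (Python) =====
-- def divide_contour_into_columns(bounding_box, num_columns=5):
--     x, y, w, h = bounding_box
--     column_width = w // num_columns
--     columns = []
--
--     for i in range(num_columns):
--         roi_left = x + i * column_width
--         roi_right = x + (i + 1) * column_width if i < num_columns - 1 else x + w
--         columns.append((roi_left, roi_right, y, y + h))
--
--     return columns
-- ===== SOURCE B (Python) =====
-- def divide_contour_into_columns(bounding_box, num_columns=5):
--     x, y, w, h = bounding_box
--     column_width = w // num_columns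
--     bottom = y + h
--
--     def split(left_edge, right_edge, count):
--         if count <= 0:
--             return []
--         if count == 1:
--             return [(left_edge, right_edge, y, bottom)]
--         half = count // 2
--         mid = left_edge + half * column_width
--         return split(left_edge, mid, half) + split(mid, right_edge, count - half)
--
--     return split(x, x + w, num_columns)
-- ===== Notes on version B (the rewrite author's own statement) =====
-- stated objective: alternative
-- what changed: B replaces A's single indexed loop (each edge x+i*(w//n), with an is-this-the-last-column conditional inside the loop) by a divide-and-conquer recursion on the column count: it splits the span [left_edge, right_edge) into halves of count//2 and count-count//2 columns and concatenates the recursive results, the top-level right edge x+w absorbing the division remainder at the rightmost leaf, so no last-column conditional is needed.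
-- outside the precondition, e.g. on divide_contour_into_columns((0, 0, 10, 5), 0): A raises ZeroDivisionError, B raises ZeroDivisionError
import Mathlib
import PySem

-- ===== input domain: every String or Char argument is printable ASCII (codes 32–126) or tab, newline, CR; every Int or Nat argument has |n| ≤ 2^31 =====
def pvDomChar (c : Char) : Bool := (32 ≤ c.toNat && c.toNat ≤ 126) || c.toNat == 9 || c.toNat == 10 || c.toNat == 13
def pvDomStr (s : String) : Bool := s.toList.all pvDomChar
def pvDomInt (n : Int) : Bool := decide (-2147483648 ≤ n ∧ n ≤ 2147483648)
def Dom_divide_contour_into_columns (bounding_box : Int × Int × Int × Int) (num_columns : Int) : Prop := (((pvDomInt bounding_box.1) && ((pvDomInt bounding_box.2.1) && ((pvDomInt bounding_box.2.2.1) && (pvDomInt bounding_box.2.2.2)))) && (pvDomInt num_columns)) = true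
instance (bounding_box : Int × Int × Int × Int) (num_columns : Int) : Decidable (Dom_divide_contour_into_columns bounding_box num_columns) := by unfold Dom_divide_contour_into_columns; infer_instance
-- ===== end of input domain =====

-- B replaces A's indexed loop with its last-iteration conditional by a divide-and-conquer split
-- of the column count: halve the count recursively, the top-level right edge x+w absorbing the
-- division remainder at the rightmost leaf; objective: alternative.

-- ===== PORT A =====
def divide_contour_into_columns (bounding_box : Int × Int × Int × Int) (num_columns : Int) : List (Int × Int × Int × Int) :=
  let x := bounding_box.1
  let y := bounding_box.2.1
  let w := bounding_box.2.2.1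
  let h := bounding_box.2.2.2
  let column_width := PySem.Int.floordiv w num_columns
  (PySem.List.pyRange 0 num_columns 1).foldl
    (fun columns i =>
      let roi_left := x + i * column_width
      let roi_right := if i < num_columns - 1 then x + (i + 1) * column_width else x + w
      columns ++ [(roi_left, roi_right, y, y + h)]) []

-- ===== PORT B =====
-- the nested recursive helper 'split' of Source B
def dccSplit (column_width y bottom : Int) (left_edge right_edge count : Int) : List (Int × Int × Int × Int) :=
  if count ≤ 0 then []
  else if count = 1 then [(left_edge, right_edge, y, bottom)]
  else
    let half := PySem.Int.floordiv count 2
    let mid := left_edge + half * column_width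
    dccSplit column_width y bottom left_edge mid half ++
      dccSplit column_width y bottom mid right_edge (count - half)
termination_by count.toNat
decreasing_by
  all_goals
    rename_i h0 h1
    rw [PySem.Int.floordiv_eq_ediv_of_pos (by omega : (0:Int) < 2)]
    omega

def divide_contour_into_columns_alt (bounding_box : Int × Int × Int × Int) (num_columns : Int) : List (Int × Int × Int × Int) :=
  let x := bounding_box.1
  let y := bounding_box.2.1
  let w := bounding_box.2.2.1
  let h := bounding_box.2.2.2
  let column_width := PySem.Int.floordiv w num_columns
  let bottom := y + h
  dccSplit column_width y bottom x (x + w) num_columns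

-- ===== PRECONDITION & SPEC =====
-- Pre_ excludes exactly num_columns = 0, where Python's '//' raises ZeroDivisionError.
def Pre_divide_contour_into_columns (bounding_box : Int × Int × Int × Int) (num_columns : Int) : Prop := num_columns ≠ 0
instance (bounding_box : Int × Int × Int × Int) (num_columns : Int) : Decidable (Pre_divide_contour_into_columns bounding_box num_columns) := by unfold Pre_divide_contour_into_columns; infer_instance

def pvWitness_divide_contour_into_columns : (Int × Int × Int × Int) × Int := ((3, 2, 17, 5), 5)

def Spec_divide_contour_into_columns (bounding_box : Int × Int × Int × Int) (num_columns : Int) (out : List (Int × Int × Int × Int)) : Prop := out = divide_contour_into_columns_alt bounding_box num_columns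
instance (bounding_box : Int × Int × Int × Int) (num_columns : Int) (out : List (Int × Int × Int × Int)) : Decidable (Spec_divide_contour_into_columns bounding_box num_columns out) := by unfold Spec_divide_contour_into_columns; infer_instance

-- ===== CLAIM (what is proved, stated in full; the proofs are below) =====
def Claim_equal_divide_contour_into_columns : Prop := ∀ (bounding_box : Int × Int × Int × Int) (num_columns : Int), Dom_divide_contour_into_columns bounding_box num_columns → Pre_divide_contour_into_columns bounding_box num_columns → Spec_divide_contour_into_columns bounding_box num_columns (divide_contour_into_columns bounding_box num_columns)

-- ===== LEMMAS AND PROOFS =====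

-- A's append-accumulating foldl is a map.
theorem foldl_append_singleton {β : Type} (f : Int → β) (xs : List Int) (acc : List β) :
    xs.foldl (fun c i => c ++ [f i]) acc = acc ++ xs.map f := by
  induction xs generalizing acc with
  | nil => simp
  | cons a t ih => simp [List.foldl, ih]

-- B's divide-and-conquer split over a count equals the per-index column table: column j runs
-- from le + j*cw to le + (j+1)*cw, except the rightmost, which ends at the passed right edge.
theorem dccSplit_eq_map (cw y b : Int) (k : Nat) :
    ∀ cnt le re : Int, cnt.toNat = k →
    dccSplit cw y b le re cnt =
      (PySem.List.pyRange 0 cnt 1).map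
        (fun j => (le + j * cw, if j < cnt - 1 then le + (j + 1) * cw else re, y, b)) := by
  induction k using Nat.strong_induction_on with
  | _ k ih =>
    intro cnt le re hk
    rw [dccSplit]
    by_cases h0 : cnt ≤ 0
    · simp [h0, PySem.List.pyRange_one_eq_nil h0]
    · by_cases h1 : cnt = 1
      · have hr : PySem.List.pyRange 0 1 1 = [0] := by decide
        subst h1
        simp [hr]
      · have h2 : (2:Int) ≤ cnt := by omega
        have hfd : PySem.Int.floordiv cnt 2 = cnt / 2 :=
          PySem.Int.floordiv_eq_ediv_of_pos (by omega)
        simp only [h0, if_false, h1]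
        set half := PySem.Int.floordiv cnt 2 with hhalf
        have hh1 : 1 ≤ half := by omega
        have hh2 : half ≤ cnt - 1 := by omega
        rw [ih half.toNat (by omega) half le (le + half * cw) rfl,
            ih (cnt - half).toNat (by omega) (cnt - half) (le + half * cw) re rfl,
            PySem.List.pyRange_one_append 0 half cnt (by omega) (by omega),
            List.map_append]
        congr 1
        · apply List.map_congr_left
          intro j hj
          have hj' := (PySem.List.mem_pyRange_one).1 hj
          have hjc : j < cnt - 1 := by omega
          by_cases hlt : j < half - 1
          · simp only [hlt, if_true, hjc, if_true]
          · have hj1 : j = half - 1 := by omega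
            simp only [hlt, if_false, hjc, if_true, Prod.mk.injEq]
            subst hj1
            and_intros <;> first | rfl | trivial | ring
        · rw [PySem.List.pyRange_one 0 (cnt - half), PySem.List.pyRange_one half cnt,
              List.map_map, List.map_map]
          simp only [sub_zero]
          apply List.map_congr_left
          intro m hm
          have hmb : (m:Int) < cnt - half := by
            have := List.mem_range.1 hm
            omega
          simp only [Function.comp, zero_add, Prod.mk.injEq]
          by_cases hc : (m:Int) < cnt - half - 1
          · have hc2 : half + (m:Int) < cnt - 1 := by omega
            simp only [hc, if_true, hc2, if_true]
            and_intros <;> first | rfl | trivial | ring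
          · have hc2 : ¬ (half + (m:Int) < cnt - 1) := by omega
            simp only [hc, if_false, hc2, if_false]
            and_intros <;> first | rfl | trivial | ring

-- ===== VERDICT (by name: the statement is the Claim_ definition above) =====
theorem divide_contour_into_columns_spec : Claim_equal_divide_contour_into_columns := by
  intro bb n _ _
  unfold Spec_divide_contour_into_columns divide_contour_into_columns divide_contour_into_columns_alt
  simp only
  rw [foldl_append_singleton,
      dccSplit_eq_map (PySem.Int.floordiv bb.2.2.1 n) bb.2.1 (bb.2.1 + bb.2.2.2) n.toNat n bb.1 (bb.1 + bb.2.2.1) rfl]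
  simp
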